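-- pv_equiv track=rewrite | github.com/maria-pugacheva/LeetCode | src/python/_01_easy/_408_valid-word-abbreviation.py | solution
-- ===== SOURCE A (Python) =====
-- def solution(word: str, abbr: str) -> bool:
--     """Given a string word and an abbreviation abbr, return whether the
--     string matches the given abbreviation. A string can be abbreviated
--     by replacing any number of non-adjacent, non-empty substrings with
--     their lengths. The lengths should not have leading zeros.
--
--     Examples:
--         >>> solution('apple', 'a2e')
--         False
--         >>> solution('substitution', 's55n')
--         False
--         >>> solution('substitution', 's010n')
--         False
--         >>> solution('substitution', 's0ubstitution')
--         False
--         >>> solution('internationalization', 'i12iz4n')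
--         True
--     """
--     n1, n2 = len(word), len(abbr)
--     i, j = 0, 0
--     while j < n2:
--         if abbr[j] == '0':
--             return False
--         if abbr[j].isnumeric():
--             n = 0
--             while j < n2 and abbr[j].isnumeric():
--                 n = n * 10 + int(abbr[j])
--                 j += 1
--             i += n
--         else:
--             if i < n1 and word[i] != abbr[j]:
--                 return False
--             i += 1
--             j += 1
--     return i == n1 and j == n2
-- ===== SOURCE B (Python) =====
-- import re
--
-- def solution(word: str, abbr: str) -> bool:
--     """Tokenize abbr into maximal digit runs and single other chars, then
--     match tokens against word with a single index."""
--     i = 0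
--     for tok in re.findall(r'\d+|\D', abbr):
--         if tok.isdigit():
--             if tok[0] == '0':
--                 return False
--             i += int(tok)
--         else:
--             if i >= len(word) or word[i] != tok:
--                 return False
--             i += 1
--     return i == len(word)
-- ===== Notes on version B (the rewrite author's own statement) =====
-- stated objective: idiomatic
-- what changed: Replaces A's index-driven while loop with nested inline digit accumulation by a regex pre-tokenization of abbr into maximal digit runs and single non-digit characters, followed by one pass over the tokens maintaining only an index into word.
import Mathlib
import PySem

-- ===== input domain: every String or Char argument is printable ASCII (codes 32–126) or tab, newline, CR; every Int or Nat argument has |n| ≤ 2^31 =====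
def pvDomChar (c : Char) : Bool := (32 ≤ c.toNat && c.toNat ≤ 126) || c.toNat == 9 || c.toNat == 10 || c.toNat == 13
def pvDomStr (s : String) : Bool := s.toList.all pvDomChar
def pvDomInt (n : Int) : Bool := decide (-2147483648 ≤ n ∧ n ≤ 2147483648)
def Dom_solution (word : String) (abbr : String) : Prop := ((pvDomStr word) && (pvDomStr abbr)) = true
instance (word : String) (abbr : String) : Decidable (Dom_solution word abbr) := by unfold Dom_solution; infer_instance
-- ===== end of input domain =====

-- B re-implements A idiomatically: abbr is pre-tokenized into maximal digit runs and
-- single non-digit characters, then matched against word in one pass over the tokens.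
-- A is total; the proof is unconditional equivalence on Dom.

-- ===== PORT A =====
-- inner `while j < n2 and abbr[j].isnumeric()` loop of A: accumulates n and advances j
-- (`isnumeric` on the ASCII domain is exactly Char.isDigit; int(abbr[j]) is c.toNat - 48)
def pvTakeNum : List Char → Nat → Nat × List Char
  | [], n => (n, [])
  | c :: rest, n =>
    if c.isDigit then pvTakeNum rest (n * 10 + (c.toNat - 48)) else (n, c :: rest)

theorem pvTakeNum_len_le (xs : List Char) (n : Nat) : (pvTakeNum xs n).2.length ≤ xs.length := by
  induction xs generalizing n with
  | nil => simp [pvTakeNum]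
  | cons c rest ih =>
    simp only [pvTakeNum]
    split
    · exact Nat.le_trans (ih _) (Nat.le_succ _)
    · exact Nat.le_refl _

-- outer `while j < n2` loop of A, over the remaining suffix of abbr (j advances = suffix shrinks);
-- i only ever grows, so it is kept as a Nat; word[i] is read only under the guard i < len(word)
def pvLoopA (word : List Char) : List Char → Nat → Bool
  | [], i => i == word.length
  | c :: rest, i =>
    if c == '0' then false
    else if c.isDigit then
      let p := pvTakeNum rest (0 * 10 + (c.toNat - 48))
      pvLoopA word p.2 (i + p.1)
    else if i < word.length && word.getD i ' ' != c then false
    else pvLoopA word rest (i + 1)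
  termination_by l => l.length
  decreasing_by
    · exact Nat.lt_succ_of_le (pvTakeNum_len_le _ _)
    · exact Nat.lt_succ_self _

def solution (word : String) (abbr : String) : Bool :=
  pvLoopA word.toList abbr.toList 0

-- ===== PORT B =====
-- re.findall(r'\d+|\D', abbr): maximal digit runs, single non-digit characters
def pvTokenize : List Char → List (List Char)
  | [] => []
  | c :: rest =>
    if c.isDigit then
      (c :: rest.takeWhile Char.isDigit) :: pvTokenize (rest.dropWhile Char.isDigit)
    else
      [c] :: pvTokenize rest
  termination_by l => l.length
  decreasing_by
    · exact Nat.lt_succ_of_le (List.length_dropWhile_le _ _)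
    · exact Nat.lt_succ_self _

-- int(tok)
def pvTokVal (t : List Char) : Nat := t.foldl (fun a c => a * 10 + (c.toNat - 48)) 0

-- the `for tok in tokens` loop of B; a token is a digit run iff its first char is a digit
def pvMatch (word : List Char) : List (List Char) → Nat → Bool
  | [], i => i == word.length
  | t :: ts, i =>
    match t with
    | [] => false  -- unreachable: pvTokenize produces no empty token
    | c :: _ =>
      if c.isDigit then
        if c == '0' then false else pvMatch word ts (i + pvTokVal t)
      else if i ≥ word.length || word.getD i ' ' != c then false
      else pvMatch word ts (i + 1)

def solution_alt (word : String) (abbr : String) : Bool :=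
  pvMatch word.toList (pvTokenize abbr.toList) 0

-- ===== PRECONDITION & SPEC =====
def Spec_solution (word : String) (abbr : String) (out : Bool) : Prop := out = solution_alt word abbr
instance (word : String) (abbr : String) (out : Bool) : Decidable (Spec_solution word abbr out) := by unfold Spec_solution; infer_instance

-- ===== CLAIM (what is proved, stated in full; the proofs are below) =====
def Claim_equal_solution : Prop := ∀ (word : String) (abbr : String), Dom_solution word abbr → Spec_solution word abbr (solution word abbr)

-- ===== LEMMAS AND PROOFS =====

theorem pvTakeNum_eq (xs : List Char) (n : Nat) :
    pvTakeNum xs n = ((xs.takeWhile Char.isDigit).foldl (fun a c => a * 10 + (c.toNat - 48)) n,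
                      xs.dropWhile Char.isDigit) := by
  induction xs generalizing n with
  | nil => simp [pvTakeNum]
  | cons c rest ih =>
    simp only [pvTakeNum, List.takeWhile, List.dropWhile]
    split <;> rename_i h <;> simp [h, ih]

-- once i has overshot, A's loop can only return false
theorem pvLoopA_overshoot (word abbr : List Char) (i : Nat) (h : word.length < i) :
    pvLoopA word abbr i = false := by
  induction abbr, i using pvLoopA.induct word with
  | case1 i => simp [pvLoopA]; omega
  | case2 c rest i h0 => rw [pvLoopA, if_pos h0]
  | case3 c rest i h0 hd p ih =>
    rw [pvLoopA, if_neg h0, if_pos hd]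
    exact ih (by omega)
  | case4 c rest i h0 hd hw =>
    rw [pvLoopA, if_neg h0, if_neg hd, if_pos hw]
  | case5 c rest i h0 hd hw ih =>
    rw [pvLoopA, if_neg h0, if_neg hd, if_neg hw]
    exact ih (by omega)

theorem pvLoopA_eq_pvMatch (word abbr : List Char) (i : Nat) :
    pvLoopA word abbr i = pvMatch word (pvTokenize abbr) i := by
  induction abbr, i using pvLoopA.induct word with
  | case1 i => simp [pvLoopA, pvTokenize, pvMatch]
  | case2 c rest i h0 =>
    -- c = '0': A rejects at once; B's digit token starts with '0'
    have h0' : c = '0' := by simpa using h0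
    subst h0'
    rw [pvLoopA, if_pos h0, pvTokenize]
    simp [pvMatch]
  | case3 c rest i h0 hd p ih =>
    -- digit run: A's accumulated number equals B's token value
    rw [pvLoopA, if_neg h0, if_pos hd, pvTokenize, if_pos hd]
    simp only [pvMatch, hd, if_true, if_neg h0]
    have hp : p = ((rest.takeWhile Char.isDigit).foldl (fun a c => a * 10 + (c.toNat - 48))
        (0 * 10 + (c.toNat - 48)), rest.dropWhile Char.isDigit) := pvTakeNum_eq rest _
    rw [hp] at ih
    rw [pvTakeNum_eq]
    simpa [pvTokVal] using ih
  | case4 c rest i h0 hd hw =>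
    -- literal char, mismatch under the guard i < len: both reject
    have hw' := hw
    simp only [Bool.and_eq_true, decide_eq_true_eq, bne_iff_ne] at hw'
    rw [pvLoopA, if_neg h0, if_neg hd, if_pos hw, pvTokenize, if_neg hd]
    simp only [pvMatch]
    rw [if_neg hd, if_pos]
    simp only [Bool.or_eq_true, bne_iff_ne, decide_eq_true_eq]
    exact Or.inr hw'.2
  | case5 c rest i h0 hd hw ih =>
    rw [pvLoopA, if_neg h0, if_neg hd, if_neg hw, pvTokenize, if_neg hd]
    simp only [pvMatch]
    rw [if_neg hd]
    split
    · -- B's guard fires: i has overshot (A's own guard rules out a mismatch in range)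
      rename_i hg
      simp only [Bool.or_eq_true, bne_iff_ne, decide_eq_true_eq] at hg
      have hge : word.length ≤ i := by
        rcases hg with h1 | h2
        · exact h1
        · by_contra hlt
          rw [Nat.not_le] at hlt
          exact hw (by simp only [Bool.and_eq_true, decide_eq_true_eq, bne_iff_ne]; exact ⟨hlt, h2⟩)
      exact pvLoopA_overshoot _ _ _ (by omega)
    · exact ih

-- ===== VERDICT (by name: the statement is the Claim_ definition above) =====
theorem solution_spec : Claim_equal_solution := by
  intro word abbr _
  unfold Spec_solution solution solution_alt
  exact pvLoopA_eq_pvMatch _ _ _
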